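-- pv_equiv track=rewrite | github.com/j0serobles/python-challenge | PyBank/main.py | find_largest_profit_increase
-- ===== SOURCE A (Python) =====
-- def find_largest_profit_increase(changes_dictionary):
--     # Input : changes_dictionary        : The dictionary with the profit/loss changes per month
--     #                                     with format { 'Mon-YYYY': NNNNNNNN, 'Mon-YYYY: NNNNNN , ... }
--     # Output: largest_changes_dictionary: A dictionary with keys = the largest profit increase amount,
--     #                                     and values = a list of months when it occurred, formatted like:
--     #                                     { NNNNNNN.NN : ['Mon-YYYY', 'Mon-YYYY', ...]}
--
--     largest_changes_dictionary = dict() # The dictionary with results to return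
--     # find the largest value:
--     largest_profit_increase = max(changes_dictionary.values())
--
--     # Reverse Lookup: For each amount that matches the maximum value, append the month to the associated list
--     for month in changes_dictionary:
--         change_amount = changes_dictionary[month]
--         if change_amount == largest_profit_increase:
--             if str(largest_profit_increase) not in largest_changes_dictionary:
--                 largest_changes_dictionary[str(largest_profit_increase)]= [month]
--             else:
--                 largest_changes_dictionary[str(largest_profit_increase)].append(month)
--
--
--     return largest_changes_dictionary
-- ===== SOURCE B (Python) =====
-- def find_largest_profit_increase(changes_dictionary):
--     # Build a value -> [months] table in one pass, then pick the max bucket.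
--     groups = {}
--     for month, change_amount in changes_dictionary.items():
--         groups.setdefault(change_amount, []).append(month)
--     largest_profit_increase = max(groups)
--     return {str(largest_profit_increase): groups[largest_profit_increase]}
-- ===== Notes on version B (the rewrite author's own statement) =====
-- stated objective: alternative
-- what changed: Instead of computing max(values) and then reverse-lookup scanning the dict for matching months, B builds a complete value->months grouping table in one pass and returns the bucket of the table's maximal key.
import Mathlib
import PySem

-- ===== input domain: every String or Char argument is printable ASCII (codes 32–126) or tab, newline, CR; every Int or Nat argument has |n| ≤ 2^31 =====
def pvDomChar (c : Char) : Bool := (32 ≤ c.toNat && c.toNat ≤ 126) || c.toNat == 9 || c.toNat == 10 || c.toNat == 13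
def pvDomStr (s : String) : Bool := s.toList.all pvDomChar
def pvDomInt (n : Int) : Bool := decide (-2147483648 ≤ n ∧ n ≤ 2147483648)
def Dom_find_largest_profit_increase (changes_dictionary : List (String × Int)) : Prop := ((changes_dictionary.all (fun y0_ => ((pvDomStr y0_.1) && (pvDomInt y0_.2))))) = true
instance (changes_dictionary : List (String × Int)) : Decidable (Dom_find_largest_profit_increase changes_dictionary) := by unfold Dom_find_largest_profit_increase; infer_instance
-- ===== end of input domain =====

-- B replaces A's "max(values) then reverse-lookup scan" with "group months by value, then select
-- the max bucket" — same cost, different decomposition (objective: alternative).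

-- ===== PORT A =====
def find_largest_profit_increase (changes_dictionary : List (String × Int)) : List (String × List String) :=
  let d := PySem.Dict.ofList changes_dictionary
  -- largest_profit_increase = max(changes_dictionary.values())  (ValueError on empty → Pre_)
  match PySem.List.max? d.values id with
  | none => []  -- unreachable under Pre_: Python raises ValueError here
  | some largest_profit_increase =>
    -- for month in changes_dictionary: …
    (d.keys.foldl (fun acc month =>
      let change_amount := d.getD month 0  -- changes_dictionary[month]; the key is always present
      if change_amount = largest_profit_increase then
        if acc.contains (PySem.Int.toStr largest_profit_increase) then
          acc.insert (PySem.Int.toStr largest_profit_increase)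
            (acc.getD (PySem.Int.toStr largest_profit_increase) [] ++ [month])
        else
          acc.insert (PySem.Int.toStr largest_profit_increase) [month]
      else acc) PySem.Dict.empty).items

-- ===== PORT B =====
def find_largest_profit_increase_alt (changes_dictionary : List (String × Int)) : List (String × List String) :=
  let d := PySem.Dict.ofList changes_dictionary
  -- groups.setdefault(change_amount, []).append(month)  ≡ modify with default []
  let groups := d.items.foldl
    (fun g p => g.modify p.2 [] (fun ms => ms ++ [p.1])) PySem.Dict.empty
  match PySem.List.max? groups.keys id with
  | none => []  -- unreachable under Pre_: Python raises ValueError here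
  | some largest_profit_increase =>
    [(PySem.Int.toStr largest_profit_increase, groups.getD largest_profit_increase [])]

-- ===== PRECONDITION & SPEC =====
-- Pre_ excludes only the empty dictionary, on which both A and B raise ValueError (max of an empty sequence).
def Pre_find_largest_profit_increase (changes_dictionary : List (String × Int)) : Prop :=
  changes_dictionary ≠ []
instance (changes_dictionary : List (String × Int)) : Decidable (Pre_find_largest_profit_increase changes_dictionary) := by unfold Pre_find_largest_profit_increase; infer_instance

def pvWitness_find_largest_profit_increase : (List (String × Int)) := [("Jan-2020", 3), ("Feb-2020", -1)]

def Spec_find_largest_profit_increase (changes_dictionary : List (String × Int)) (out : List (String × List String)) : Prop := out = find_largest_profit_increase_alt changes_dictionary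
instance (changes_dictionary : List (String × Int)) (out : List (String × List String)) : Decidable (Spec_find_largest_profit_increase changes_dictionary out) := by unfold Spec_find_largest_profit_increase; infer_instance

-- ===== CLAIM (what is proved, stated in full; the proofs are below) =====
def Claim_equal_find_largest_profit_increase : Prop := ∀ (changes_dictionary : List (String × Int)), Dom_find_largest_profit_increase changes_dictionary → Pre_find_largest_profit_increase changes_dictionary → Spec_find_largest_profit_increase changes_dictionary (find_largest_profit_increase changes_dictionary)

-- ===== LEMMAS AND PROOFS =====

-- max over the deduplicated values equals max over the values (ties are equal as values).
lemma max?_ofList_int (xs : List Int) :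
    PySem.List.max? (PySem.Set.ofList xs) id = PySem.List.max? xs id := by
  cases h1 : PySem.List.max? xs id with
  | none =>
      rw [PySem.List.max?_eq_none_iff] at h1
      subst h1; rfl
  | some m =>
      have hm : m ∈ xs := PySem.List.max?_mem h1
      have hne : (PySem.Set.ofList xs : List Int) ≠ [] := by
        intro h
        have := (PySem.Set.mem_ofList xs m).mpr hm
        simp [h] at this
      cases h2 : PySem.List.max? (PySem.Set.ofList xs) id with
      | none => rw [PySem.List.max?_eq_none_iff] at h2; exact absurd h2 hne
      | some m' =>
          have hm' : m' ∈ xs := (PySem.Set.mem_ofList xs m').mp (PySem.List.max?_mem h2)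
          have h1le : m' ≤ m := PySem.List.max?_isMax h1 m' hm'
          have h2le : m ≤ m' := PySem.List.max?_isMax h2 m ((PySem.Set.mem_ofList xs m).mpr hm)
          simp [le_antisymm h1le h2le]

-- the accumulator of A's reverse-lookup loop: empty, or the single bucket under `key`
def aAcc (key : String) (ms : List String) : PySem.Dict String (List String) :=
  if ms = [] then PySem.Dict.empty else PySem.Dict.mk [(key, ms)]

lemma aAcc_step (key : String) (ms : List String) (month : String) :
    (if (aAcc key ms).contains key then
        (aAcc key ms).insert key ((aAcc key ms).getD key [] ++ [month])
      else (aAcc key ms).insert key [month]) = aAcc key (ms ++ [month]) := by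
  cases ms with
  | nil =>
      apply PySem.Dict.ext
      simp [aAcc, PySem.Dict.items_insert_of_not_contains, PySem.Dict.empty]
  | cons m tl =>
      apply PySem.Dict.ext
      have hc : (aAcc key (m :: tl)).contains key = true := by
        simp [aAcc, PySem.Dict.contains_mk]
      rw [if_pos hc, PySem.Dict.items_insert_of_contains _ _ hc]
      simp [aAcc, PySem.Dict.getD_eq_get?_getD, PySem.Dict.get?_mk_cons]

lemma aLoop (largest : Int) (l : List (String × Int)) (ms : List String) :
    l.foldl (fun acc p =>
        if p.2 = largest then
          if acc.contains (PySem.Int.toStr largest) then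
            acc.insert (PySem.Int.toStr largest)
              (acc.getD (PySem.Int.toStr largest) [] ++ [p.1])
          else acc.insert (PySem.Int.toStr largest) [p.1]
        else acc) (aAcc (PySem.Int.toStr largest) ms)
    = aAcc (PySem.Int.toStr largest)
        (ms ++ (l.filter (fun p => p.2 == largest)).map (fun p => p.1)) := by
  induction l generalizing ms with
  | nil => simp
  | cons p l ih =>
      by_cases hp : p.2 = largest
      · simp [List.foldl_cons, hp, aAcc_step, ih]
      · simp [List.foldl_cons, hp, ih]

-- B's grouping table: its keys are the distinct values, its bucket at c the months with value c.
lemma groups_eq (items : List (String × Int)) :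
    items.foldl (fun g p => g.modify p.2 [] (fun ms => ms ++ [p.1]))
        (PySem.Dict.empty : PySem.Dict Int (List String))
    = (items.map Prod.swap).foldl (fun g p => g.modify p.1 [] (fun ms => ms ++ [p.2]))
        PySem.Dict.empty := by
  rw [List.foldl_map]
  rfl

-- ===== VERDICT (by name: the statement is the Claim_ definition above) =====

theorem find_largest_profit_increase_spec : Claim_equal_find_largest_profit_increase := by
  intro cd _ hpre
  unfold Spec_find_largest_profit_increase
  unfold find_largest_profit_increase find_largest_profit_increase_alt
  dsimp only
  set d := PySem.Dict.ofList cd with hd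
  have hnodup : d.keys.Nodup := PySem.Dict.nodup_keys_ofList cd
  -- the two max computations agree
  have hkeys : (d.items.foldl (fun g p => g.modify p.2 [] (fun ms => ms ++ [p.1]))
      (PySem.Dict.empty : PySem.Dict Int (List String))).keys
      = PySem.Set.ofList (d.items.map (fun p => p.2)) := by
    rw [groups_eq]
    rw [PySem.Dict.keys_foldl_modify_key ((d.items.map Prod.swap)) (fun p => p.1) []
      (fun _ p => (fun ms => ms ++ [p.2]))]
    simp only [PySem.Dict.keys_empty, PySem.Set.update_nil_left, List.map_map]
    rfl
  have hvals : d.values = d.items.map (fun p => p.2) := rfl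
  have hmax : PySem.List.max? ((d.items.foldl (fun g p => g.modify p.2 [] (fun ms => ms ++ [p.1]))
      (PySem.Dict.empty : PySem.Dict Int (List String))).keys) id
      = PySem.List.max? d.values id := by
    rw [hkeys, max?_ofList_int, hvals]
  rw [hmax]
  cases hmx : PySem.List.max? d.values id with
  | none => rfl
  | some largest =>
      dsimp only
      -- B's bucket
      have hbucket : (d.items.foldl (fun g p => g.modify p.2 [] (fun ms => ms ++ [p.1]))
          (PySem.Dict.empty : PySem.Dict Int (List String))).getD largest []
          = (d.items.filter (fun p => p.2 == largest)).map (fun p => p.1) := by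
        rw [groups_eq, PySem.Dict.getD_foldl_modify_append]
        simp only [PySem.Dict.getD_empty, List.nil_append]
        rw [List.filter_map]
        simp [List.map_map, Function.comp_def]
      -- A's loop over keys is the loop over items
      have hkeysmap : d.keys = d.items.map (fun p => p.1) := rfl
      have hloop1 : (d.keys.foldl (fun acc month =>
          if d.getD month 0 = largest then
            if acc.contains (PySem.Int.toStr largest) then
              acc.insert (PySem.Int.toStr largest)
                (acc.getD (PySem.Int.toStr largest) [] ++ [month])
            else acc.insert (PySem.Int.toStr largest) [month]
          else acc) (PySem.Dict.empty : PySem.Dict String (List String)))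
          = d.items.foldl (fun acc p =>
            if p.2 = largest then
              if acc.contains (PySem.Int.toStr largest) then
                acc.insert (PySem.Int.toStr largest)
                  (acc.getD (PySem.Int.toStr largest) [] ++ [p.1])
              else acc.insert (PySem.Int.toStr largest) [p.1]
            else acc) PySem.Dict.empty := by
        rw [hkeysmap, List.foldl_map]
        apply PySem.List.foldl_congr_mem
        intro acc p hp
        have hget : d.getD p.1 0 = p.2 := PySem.Dict.getD_of_mem_items d hp hnodup 0
        simp only [hget]
      rw [hloop1]
      have := aLoop largest d.items []
      simp only [List.nil_append] at this
      have h0 : aAcc (PySem.Int.toStr largest) [] = (PySem.Dict.empty : PySem.Dict String (List String)) := rfl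
      rw [h0] at this
      rw [this, hbucket]
      -- the filter is nonempty: largest is one of the values
      have hmem : largest ∈ d.items.map (fun p => p.2) := by
        rw [← hvals]; exact PySem.List.max?_mem hmx
      obtain ⟨p, hpmem, hpv⟩ := List.mem_map.mp hmem
      have hne : (d.items.filter (fun p => p.2 == largest)).map (fun p => p.1) ≠ [] := by
        intro h
        rw [List.map_eq_nil_iff, List.filter_eq_nil_iff] at h
        exact h p hpmem (by simp [hpv])
      simp [aAcc, hne]
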